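-- pv_equiv track=rewrite | github.com/satunr/TRN | enumerate.py | pathgenerate
-- ===== SOURCE A (Python) =====
-- import itertools
-- from copy import deepcopy
--
-- def pathgenerate(m,p,P):
--
--     pc = []
--
--     a = [range(len(w)) for w in m]
--     permutations = list(itertools.product(*a))
--
--     for i in range(len(permutations)):
--
--         #new path
--         p_duplicate = deepcopy(p)
--
--         for j in range(len(permutations[i])):
--             p_duplicate.insert(j * 2 + 1,m[j][permutations[i][j]])
--
--         #Remove all "None" terms from the new path
--         p_duplicate = [each for each in p_duplicate if each != None]
--
--         pc.append(p_duplicate)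
--
--     return pc
-- ===== SOURCE B (Python) =====
-- from copy import deepcopy
--
-- def pathgenerate(m, p, P):
--     # Interleave base path q with chosen values cs (choice j goes right after
--     # base element j), dropping None base elements; deepcopy base elements,
--     # share the choice references.
--     def interleave(q, cs):
--         if not q and not cs:
--             return []
--         out = []
--         if q and q[0] is not None:
--             out.append(deepcopy(q[0]))
--         if cs:
--             out.append(cs[0])
--         return out + interleave(q[1:], cs[1:])
--
--     # Enumerate the Cartesian product of the rows of ms (rightmost position
--     # varying fastest), building each finished path directly.
--     def rec(ms, chosen):
--         if not ms:
--             return [interleave(p, chosen)]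
--         paths = []
--         for c in ms[0]:
--             paths += rec(ms[1:], chosen + [c])
--         return paths
--
--     return rec(m, [])
-- ===== Notes on version B (the rewrite author's own statement) =====
-- stated objective: alternative
-- what changed: Replaces itertools.product over index tuples plus repeated list.insert at positions 2j+1 (and a trailing None filter) with a direct recursive enumeration of the Cartesian product of the choice rows that builds each interleaved, None-filtered path in a single structural pass.
import Mathlib
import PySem

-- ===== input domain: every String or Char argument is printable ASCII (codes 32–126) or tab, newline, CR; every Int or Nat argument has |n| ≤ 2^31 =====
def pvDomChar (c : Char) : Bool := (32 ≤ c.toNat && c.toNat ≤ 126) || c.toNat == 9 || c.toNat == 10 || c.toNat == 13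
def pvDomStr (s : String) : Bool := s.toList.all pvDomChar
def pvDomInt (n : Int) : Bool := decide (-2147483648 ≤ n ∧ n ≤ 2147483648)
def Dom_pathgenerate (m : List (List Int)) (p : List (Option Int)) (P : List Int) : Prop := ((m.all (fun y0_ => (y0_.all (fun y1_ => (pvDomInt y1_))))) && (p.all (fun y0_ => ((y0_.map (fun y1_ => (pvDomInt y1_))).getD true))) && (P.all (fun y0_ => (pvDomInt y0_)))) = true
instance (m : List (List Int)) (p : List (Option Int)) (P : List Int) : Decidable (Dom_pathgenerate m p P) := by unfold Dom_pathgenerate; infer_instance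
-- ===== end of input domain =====

-- B replaces itertools.product + repeated list.insert (then a None filter) with a direct
-- recursive product enumeration that builds each interleaved None-filtered path in one pass.


-- ===== PORT A =====
-- itertools.product(*a): empty input yields [[]]; rightmost factor varies fastest
def pyProductA : List (List Int) → List (List Int)
  | [] => [[]]
  | xs :: rest => xs.flatMap (fun x => (pyProductA rest).map (fun t => x :: t))

def pathgenerate (m : List (List Int)) (p : List (Option Int)) (P : List Int) : List (List Int) :=
  let a := m.map (fun w => PySem.List.pyRange 0 (w.length : Int) 1)
  let permutations := pyProductA a
  (PySem.List.pyRange 0 (permutations.length : Int) 1).foldl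
    (fun pc i =>
      let perm := PySem.List.pyGetD permutations i []
      let pdup :=
        (PySem.List.pyRange 0 (perm.length : Int) 1).foldl
          (fun pd j =>
            PySem.List.insert pd (j * 2 + 1)
              (some (PySem.List.pyGetD (PySem.List.pyGetD m j []) (PySem.List.pyGetD perm j 0) 0)))
          p
      -- '[each for each in p_duplicate if each != None]' keeps exactly the non-None
      -- entries (which are ints): filterMap id
      pc ++ [pdup.filterMap id]) []

-- ===== PORT B =====
-- Source B interleave(q, cs): up to two head elements (q[0] if not None, cs[0]), then recurse on tails
def interleaveB : List (Option Int) → List Int → List Int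
  | [], [] => []
  | [], c :: cs => c :: interleaveB [] cs
  | none :: q, [] => interleaveB q []
  | some x :: q, [] => x :: interleaveB q []
  | none :: q, c :: cs => c :: interleaveB q cs
  | some x :: q, c :: cs => x :: c :: interleaveB q cs

-- Source B rec(ms, chosen)
def recB (p : List (Option Int)) : List (List Int) → List Int → List (List Int)
  | [], chosen => [interleaveB p chosen]
  | row :: rest, chosen => row.foldl (fun paths c => paths ++ recB p rest (chosen ++ [c])) []

def pathgenerate_alt (m : List (List Int)) (p : List (Option Int)) (P : List Int) : List (List Int) :=
  recB p m []

-- ===== PRECONDITION & SPEC =====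
def Spec_pathgenerate (m : List (List Int)) (p : List (Option Int)) (P : List Int) (out : List (List Int)) : Prop := out = pathgenerate_alt m p P
instance (m : List (List Int)) (p : List (Option Int)) (P : List Int) (out : List (List Int)) : Decidable (Spec_pathgenerate m p P out) := by unfold Spec_pathgenerate; infer_instance

-- ===== CLAIM (what is proved, stated in full; the proofs are below) =====
def Claim_equal_pathgenerate : Prop := ∀ (m : List (List Int)) (p : List (Option Int)) (P : List Int), Dom_pathgenerate m p P → Spec_pathgenerate m p P (pathgenerate m p P)

-- ===== LEMMAS AND PROOFS =====

-- the unfiltered interleaving A's insert loop produces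
def weaveO : List (Option Int) → List (Option Int) → List (Option Int)
  | ps, [] => ps
  | [], vs => vs
  | x :: ps, v :: vs => x :: v :: weaveO ps vs

-- the values A looks up for a given index tuple
def pickVals : List (List Int) → List Int → List Int
  | w :: ms, k :: ks => PySem.List.pyGetD w k 0 :: pickVals ms ks
  | _, _ => []

lemma insert_natCast {α : Type} (xs : List α) (n : Nat) (v : α) :
    PySem.List.insert xs (n : Int) v = xs.take n ++ v :: xs.drop n := by
  simp only [PySem.List.insert, PySem.List.sliceIndices]
  have h1 : ¬ ((1:Int) < 0) := by omega
  simp only [if_neg h1]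
  have h2 : ¬ ((n:Int) < 0) := by omega
  simp only [if_neg h2]
  by_cases h : n ≤ xs.length
  · have : min (n:Int) (xs.length:Int) = (n:Int) := by omega
    simp [this]
  · have : min (n:Int) (xs.length:Int) = (xs.length:Int) := by omega
    rw [this]
    simp [List.take_of_length_le (by omega : xs.length ≤ n),
      List.drop_of_length_le (by omega : xs.length ≤ n)]

lemma take_drop_weave : ∀ (vs q : List (Option Int)) (v : Option Int),
    (weaveO q vs).take (vs.length * 2 + 1) ++ v :: (weaveO q vs).drop (vs.length * 2 + 1)
      = weaveO q (vs ++ [v])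
  | [], [], v => rfl
  | [], x :: ps, v => by simp [weaveO]
  | w :: vs', [], v => by
      simp [weaveO,
        List.take_of_length_le (by omega : vs'.length ≤ (vs'.length + 1) * 2),
        List.drop_of_length_le (by omega : vs'.length ≤ (vs'.length + 1) * 2)]
  | w :: vs', x :: ps, v => by
      have hk : (w :: vs').length * 2 + 1 = (vs'.length * 2 + 1) + 1 + 1 := by simp; omega
      simp only [weaveO, hk, List.take_succ_cons, List.drop_succ_cons, List.cons_append]
      have := take_drop_weave vs' ps v
      rw [this]

lemma insert_weave_snoc (vs q : List (Option Int)) (v : Option Int) :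
    PySem.List.insert (weaveO q vs) ((vs.length : Int) * 2 + 1) v = weaveO q (vs ++ [v]) := by
  have hc : ((vs.length : Int) * 2 + 1) = ((vs.length * 2 + 1 : Nat) : Int) := by push_cast; ring
  rw [hc, insert_natCast]
  exact take_drop_weave vs q v

lemma foldl_insert_weave (f : Int → Option Int) : ∀ (n : Nat) (q : List (Option Int)),
    (PySem.List.pyRange 0 (n : Int) 1).foldl
      (fun pd j => PySem.List.insert pd (j * 2 + 1) (f j)) q
      = weaveO q ((PySem.List.pyRange 0 (n : Int) 1).map f)
  | 0, q => by simp [PySem.List.pyRange_one_eq_nil (by omega : (0:Int) ≤ 0), weaveO]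
  | n + 1, q => by
      have hcast : ((n + 1 : Nat) : Int) = (n : Int) + 1 := by push_cast; ring
      rw [hcast, PySem.List.pyRange_one_succ_right (by omega : (0:Int) ≤ (n:Int))]
      rw [List.foldl_append, List.map_append, foldl_insert_weave f n q]
      simp only [List.foldl_cons, List.foldl_nil, List.map_cons, List.map_nil]
      have hlen : ((PySem.List.pyRange 0 (n:Int) 1).map f).length = n := by
        simp [PySem.List.length_pyRange_one]
      have h := insert_weave_snoc (((PySem.List.pyRange 0 (n:Int) 1).map f)) q (f (n:Int))
      rw [hlen] at h
      exact h

lemma map_idx_pick : ∀ (ms : List (List Int)) (ks : List Int), ks.length = ms.length →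
    (List.range ks.length).map
      (fun j => PySem.List.pyGetD (ms.getD j []) (ks.getD j 0) 0) = pickVals ms ks
  | [], [], _ => rfl
  | w :: ms', k :: ks', h => by
      simp only [List.length_cons, List.range_succ_eq_map, List.map_cons, List.map_map]
      simp only [List.getD_cons_zero, Function.comp_def, Nat.succ_eq_add_one,
        List.getD_cons_succ, pickVals]
      rw [map_idx_pick ms' ks' (by simpa using h)]

lemma length_mem_pyProductA : ∀ (L : List (List Int)) (t : List Int), t ∈ pyProductA L → t.length = L.length := by
  intro L
  induction L with
  | nil => intro t ht; simp [pyProductA] at ht; simp [ht]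
  | cons w rest ih =>
      intro t ht
      simp only [pyProductA, List.mem_flatMap, List.mem_map] at ht
      obtain ⟨x, _, t', ht', rfl⟩ := ht
      simp [ih t' ht']

lemma map_pick_product : ∀ (ms : List (List Int)),
    (pyProductA (ms.map (fun w => PySem.List.pyRange 0 (w.length : Int) 1))).map (pickVals ms)
      = pyProductA ms
  | [] => rfl
  | w :: ms' => by
      simp only [List.map_cons, pyProductA, List.map_flatMap, List.map_map]
      have hrow : ∀ k t, pickVals (w :: ms') (k :: t) = PySem.List.pyGetD w k 0 :: pickVals ms' t :=
        fun _ _ => rfl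
      calc (PySem.List.pyRange 0 (w.length : Int) 1).flatMap
              (fun k => (pyProductA (ms'.map (fun w => PySem.List.pyRange 0 (w.length : Int) 1))).map
                (fun t => pickVals (w :: ms') (k :: t)))
          = (PySem.List.pyRange 0 (w.length : Int) 1).flatMap
              (fun k => (pyProductA ms').map (fun t => PySem.List.pyGetD w k 0 :: t)) := by
            refine List.flatMap_congr ?_
            intro k _
            simp only [hrow]
            rw [← map_pick_product ms', List.map_map]
            rfl
        _ = ((PySem.List.pyRange 0 (w.length : Int) 1).map
              (fun k => PySem.List.pyGetD w k 0)).flatMap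
              (fun x => (pyProductA ms').map (fun t => x :: t)) := by
            rw [List.flatMap_map]
        _ = w.flatMap (fun x => (pyProductA ms').map (fun t => x :: t)) := by
            rw [PySem.List.map_pyGetD_pyRange_zero']

lemma interleaveB_nil_left : ∀ cs : List Int, interleaveB [] cs = cs
  | [] => by simp [interleaveB]
  | c :: cs => by simp [interleaveB, interleaveB_nil_left cs]

lemma interleaveB_nil_right : ∀ q : List (Option Int), interleaveB q [] = q.filterMap id
  | [] => by simp [interleaveB]
  | none :: q => by simp [interleaveB, interleaveB_nil_right q]
  | some x :: q => by simp [interleaveB, interleaveB_nil_right q]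

lemma filterMap_weave : ∀ (q : List (Option Int)) (vs : List Int),
    (weaveO q (vs.map some)).filterMap id = interleaveB q vs
  | q, [] => by simpa [weaveO] using (interleaveB_nil_right q).symm
  | [], v :: vs => by
      simp [weaveO, interleaveB_nil_left]
  | none :: q, v :: vs => by
      simp only [weaveO, interleaveB, List.map_cons, List.filterMap_cons]
      simpa using filterMap_weave q vs
  | some x :: q, v :: vs => by
      simp only [weaveO, interleaveB, List.map_cons, List.filterMap_cons]
      simpa using filterMap_weave q vs

lemma recB_eq (p : List (Option Int)) : ∀ (ms : List (List Int)) (chosen : List Int),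
    recB p ms chosen = (pyProductA ms).map (fun t => interleaveB p (chosen ++ t))
  | [], chosen => by simp [recB, pyProductA]
  | row :: rest, chosen => by
      simp only [recB]
      have hbody : ∀ c, recB p rest (chosen ++ [c])
          = (pyProductA rest).map (fun t => interleaveB p ((chosen ++ [c]) ++ t)) :=
        fun c => recB_eq p rest (chosen ++ [c])
      simp only [hbody]
      rw [PySem.List.foldl_append_eq_flatMap]
      simp only [pyProductA, List.map_flatMap, List.map_map, List.nil_append]
      refine List.flatMap_congr ?_
      intro c _
      refine List.map_congr_left ?_
      intro t _
      simp

-- ===== VERDICT (by name: the statement is the Claim_ definition above) =====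
theorem pathgenerate_spec : Claim_equal_pathgenerate := by
  intro m p P _
  show pathgenerate m p P = pathgenerate_alt m p P
  simp only [pathgenerate, pathgenerate_alt]
  rw [PySem.List.foldl_pyRange_zero_pyGetD'
        (pyProductA (m.map (fun w => PySem.List.pyRange 0 (w.length : Int) 1))) []
        (fun pc perm => pc ++ [((PySem.List.pyRange 0 (perm.length : Int) 1).foldl
          (fun pd j => PySem.List.insert pd (j * 2 + 1)
            (some (PySem.List.pyGetD (PySem.List.pyGetD m j []) (PySem.List.pyGetD perm j 0) 0))) p).filterMap id]) []]
  rw [PySem.List.foldl_append_singleton_eq_map]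
  rw [recB_eq p m []]
  simp only [List.nil_append]
  rw [← map_pick_product m, List.map_map]
  refine List.map_congr_left ?_
  intro perm hperm
  have hlen : perm.length = m.length := by
    have := length_mem_pyProductA _ perm hperm
    simpa using this
  simp only [Function.comp_def]
  rw [foldl_insert_weave]
  have hmap : (PySem.List.pyRange 0 (perm.length : Int) 1).map
        (fun j => some (PySem.List.pyGetD (PySem.List.pyGetD m j []) (PySem.List.pyGetD perm j 0) 0))
      = (pickVals m perm).map some := by
    rw [PySem.List.pyRange_zero_natCast, List.map_map]
    rw [← map_idx_pick m perm (by omega), List.map_map]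
    refine List.map_congr_left ?_
    intro j _
    simp [PySem.List.pyGetD_natCast]
  rw [hmap, filterMap_weave]
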